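-- pv_equiv track=rewrite | github.com/kelp-baliram/Leadership | Main/Parser.py | ExactDesignationMatch
-- ===== SOURCE A (Python) =====
-- designation_dict={'chief executive officer': 1,
-- "founder & managing director":1,
--  'chief executive': 1,
--  'ceo': 1,
--  'managing partner': 1,
--  'managing director': 1,
--  'founder': 1,
--  'owner': 1,
--  'chairman': 1,
--  'director': 1,
--  'executive director': 1,
--  'co-founder': 1,
--  'cofounder': 1,
--  'co founder': 1,
--  'group managing director': 1,
--  }
--
-- def ExactDesignationMatch(data,ignor_list_name,result):
--     for designation , name in data.items():
--
--         try:
--             name=name.lower()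
--
--             designation=designation.lower()
--             designation_dict[designation]
--             if name  in ignor_list_name:
--                 pass
--             else:
--
--                 if designation in result:
--                     result[designation].add(name)
--                 else:
--                     result[designation]={name}
--
--         except:
--             pass
--     for name,designation in data.items():
--
--         try:
--             name=name.lower()
--
--             designation=designation.lower()
--             designation_dict[designation]
--             if name  in ignor_list_name:
--                 pass
--             else:
--
--                 if designation in result:
--                     result[designation].add(name)
--                 else:
--                     result[designation]={name}
--         except:
--             pass
--     return result
-- ===== SOURCE B (Python) =====
-- # Group-by re-implementation: extract the accepted (designation, name) events once,
-- # then build the output per key (existing keys of result first, then new designations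
-- # in first-appearance order) instead of mutating a dict event by event; like A, the
-- # equivalence is about the RETURN value (A mutates `result` and its sets in place,
-- # and B also adds into result's existing set objects).
-- DESIGNATIONS = frozenset([
--     'chief executive officer', "founder & managing director", 'chief executive',
--     'ceo', 'managing partner', 'managing director', 'founder', 'owner',
--     'chairman', 'director', 'executive director', 'co-founder', 'cofounder',
--     'co founder', 'group managing director',
-- ])
--
-- def ExactDesignationMatch(data, ignor_list_name, result):
--     events = [(d, n) for d, n in
--               ([(k.lower(), v.lower()) for k, v in data.items()] +
--                [(v.lower(), k.lower()) for k, v in data.items()])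
--               if d in DESIGNATIONS and n not in ignor_list_name]
--     keys = list(result)
--     for d, _ in events:
--         if d not in keys:
--             keys.append(d)
--     out = {}
--     for k in keys:
--         names = result.get(k, set())
--         for d, n in events:
--             if d == k:
--                 names.add(n)
--         out[k] = names
--     return out
-- ===== Notes on version B (the rewrite author's own statement) =====
-- stated objective: alternative
-- what changed: Replaces A's two duplicated try/except dict-mutation loops with a group-by construction: extract the accepted lowered (designation, name) events once, compute the output key order (existing result keys then new designations by first appearance), and build each key's name set by scanning the events for that key.
import Mathlib
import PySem

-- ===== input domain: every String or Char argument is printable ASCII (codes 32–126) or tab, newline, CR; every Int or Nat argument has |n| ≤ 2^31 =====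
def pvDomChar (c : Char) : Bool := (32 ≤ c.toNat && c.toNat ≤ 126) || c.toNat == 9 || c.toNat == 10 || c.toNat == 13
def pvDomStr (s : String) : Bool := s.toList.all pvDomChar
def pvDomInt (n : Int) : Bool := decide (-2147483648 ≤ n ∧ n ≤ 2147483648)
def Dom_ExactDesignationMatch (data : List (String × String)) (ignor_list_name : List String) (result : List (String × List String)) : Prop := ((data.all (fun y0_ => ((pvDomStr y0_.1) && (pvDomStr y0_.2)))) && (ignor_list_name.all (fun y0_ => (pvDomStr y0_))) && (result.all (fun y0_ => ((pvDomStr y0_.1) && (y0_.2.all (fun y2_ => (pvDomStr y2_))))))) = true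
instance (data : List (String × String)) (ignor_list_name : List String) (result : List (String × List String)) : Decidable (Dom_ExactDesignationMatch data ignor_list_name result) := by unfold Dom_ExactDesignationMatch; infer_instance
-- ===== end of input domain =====

-- B replaces A's two duplicated try/except dict-mutation loops by a group-by construction
-- (objective: alternative). Both Pythons observably touch `result`'s sets in place; the
-- theorem below is about the RETURN value.

-- ===== PORT A =====
-- module constant designation_dict, in source order
def pvDesignationDict : PySem.Dict String Int := PySem.Dict.mk
  [("chief executive officer", 1), ("founder & managing director", 1),
   ("chief executive", 1), ("ceo", 1), ("managing partner", 1),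
   ("managing director", 1), ("founder", 1), ("owner", 1), ("chairman", 1),
   ("director", 1), ("executive director", 1), ("co-founder", 1),
   ("cofounder", 1), ("co founder", 1), ("group managing director", 1)]

-- Two identical loops over data.items(): first with (designation, name) = (key, value),
-- then with (name, designation) = (key, value).  All inputs are strings, so inside the
-- try block only designation_dict[designation] can raise (KeyError); the bare except
-- turns that into a skip, which the `match … | none => r` transcribes.
def ExactDesignationMatch (data : List (String × String)) (ignor_list_name : List String) (result : List (String × List String)) : List (String × List String) :=
  let d0 : PySem.Dict String (List String) := PySem.Dict.ofList result
  let d1 := data.foldl (fun r p =>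
      let name := PySem.Str.lower p.2
      let designation := PySem.Str.lower p.1
      match pvDesignationDict.get? designation with
      | none => r        -- KeyError → except: pass
      | some _ =>
        if name ∈ ignor_list_name then r
        else if r.contains designation then
          r.modify designation [] (fun s => PySem.Set.add s name)   -- result[designation].add(name)
        else r.insert designation [name]                            -- result[designation] = {name}
      ) d0
  let d2 := data.foldl (fun r p =>
      let name := PySem.Str.lower p.1
      let designation := PySem.Str.lower p.2
      match pvDesignationDict.get? designation with
      | none => r
      | some _ =>
        if name ∈ ignor_list_name then r
        else if r.contains designation then
          r.modify designation [] (fun s => PySem.Set.add s name)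
        else r.insert designation [name]
      ) d1
  d2.items

-- ===== PORT B =====
-- module constant DESIGNATIONS (a frozenset literal; all elements distinct)
def pvDesignations : PySem.Set String :=
  ["chief executive officer", "founder & managing director", "chief executive",
   "ceo", "managing partner", "managing director", "founder", "owner", "chairman",
   "director", "executive director", "co-founder", "cofounder", "co founder",
   "group managing director"]

def ExactDesignationMatch_alt (data : List (String × String)) (ignor_list_name : List String) (result : List (String × List String)) : List (String × List String) :=
  let d0 : PySem.Dict String (List String) := PySem.Dict.ofList result
  -- events = accepted lowered (designation, name) pairs, both orientations
  let events := ((data.map (fun p => (PySem.Str.lower p.1, PySem.Str.lower p.2)))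
              ++ (data.map (fun p => (PySem.Str.lower p.2, PySem.Str.lower p.1)))).filter
      (fun q => PySem.Set.contains pvDesignations q.1 && !(ignor_list_name.contains q.2))
  -- keys = list(result); for d, _ in events: if d not in keys: keys.append(d)
  let keys := events.foldl (fun ks e => PySem.Set.add ks e.1) d0.keys
  -- out = {}; for k in keys: out[k] = result.get(k, set()) + matching names; return out
  (keys.foldl (fun out k =>
      out.insert k (events.foldl (fun s e => if e.1 == k then PySem.Set.add s e.2 else s)
                      (d0.getD k []))) PySem.Dict.empty).items

-- ===== PRECONDITION & SPEC =====
def Spec_ExactDesignationMatch (data : List (String × String)) (ignor_list_name : List String) (result : List (String × List String)) (out : List (String × List String)) : Prop := out = ExactDesignationMatch_alt data ignor_list_name result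
instance (data : List (String × String)) (ignor_list_name : List String) (result : List (String × List String)) (out : List (String × List String)) : Decidable (Spec_ExactDesignationMatch data ignor_list_name result out) := by unfold Spec_ExactDesignationMatch; infer_instance

-- ===== CLAIM =====
def Claim_equal_ExactDesignationMatch : Prop := ∀ (data : List (String × String)) (ignor_list_name : List String) (result : List (String × List String)), Dom_ExactDesignationMatch data ignor_list_name result → Spec_ExactDesignationMatch data ignor_list_name result (ExactDesignationMatch data ignor_list_name result)

-- ===== LEMMAS AND PROOFS =====

-- membership in the literal designation dict agrees with membership in the literal set
theorem pvKey_eq (s : String) :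
    (pvDesignationDict.get? s).isSome = PySem.Set.contains pvDesignations s := by
  simp only [pvDesignationDict, pvDesignations, PySem.Dict.get?]
  rw [Option.isSome_map, List.isSome_find?]
  simp [PySem.Set.contains, List.any_cons, BEq.comm, Bool.beq_eq_decide_eq]

-- the loop body of A equals a guarded modify-with-default
theorem pvBody_eq (ign : List String) (r : PySem.Dict String (List String)) (dg nm : String) :
    (match pvDesignationDict.get? (PySem.Str.lower dg) with
     | none => r
     | some _ =>
       if PySem.Str.lower nm ∈ ign then r
       else if r.contains (PySem.Str.lower dg) then
         r.modify (PySem.Str.lower dg) [] (fun s => PySem.Set.add s (PySem.Str.lower nm))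
       else r.insert (PySem.Str.lower dg) [PySem.Str.lower nm])
    = (if PySem.Set.contains pvDesignations (PySem.Str.lower dg) && !(ign.contains (PySem.Str.lower nm)) then
         r.modify (PySem.Str.lower dg) [] (fun s => PySem.Set.add s (PySem.Str.lower nm))
       else r) := by
  set d := PySem.Str.lower dg
  set n := PySem.Str.lower nm
  rw [← pvKey_eq]
  cases hk : pvDesignationDict.get? d with
  | none => simp
  | some v =>
    simp only [Option.isSome_some, Bool.true_and]
    by_cases hm : n ∈ ign
    · simp [hm]
    · simp only [hm, List.contains_eq_mem, if_false, decide_false, Bool.not_false, if_true]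
      by_cases hc : r.contains d
      · rw [if_pos hc]
      · rw [if_neg (by simp [hc]), PySem.Dict.modify]
        rw [PySem.Dict.getD_of_not_contains r [] (by simpa using hc)]
        simp [PySem.Set.add]

-- getD after a modify-with-default loop collects exactly the matching adds
theorem pvGetD_foldl_modify_add (l : List (String × String)) (d : PySem.Dict String (List String)) (k : String) :
    (l.foldl (fun r q => r.modify q.1 [] (fun s => PySem.Set.add s q.2)) d).getD k []
    = l.foldl (fun s e => if e.1 == k then PySem.Set.add s e.2 else s) (d.getD k []) := by
  induction l generalizing d with
  | nil => rfl
  | cons q l ih =>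
    simp only [List.foldl_cons, ih, PySem.Dict.getD_modify]
    by_cases h : k = q.1
    · simp [h]
    · simp [h, Ne.symm h]

-- ===== VERDICT =====
theorem ExactDesignationMatch_spec : Claim_equal_ExactDesignationMatch := by
  intro data ign result _
  unfold Spec_ExactDesignationMatch ExactDesignationMatch ExactDesignationMatch_alt
  simp only
  set d0 : PySem.Dict String (List String) := PySem.Dict.ofList result with hd0
  -- step 1: both of A's loops have the guarded-modify body
  have h1 : (fun (r : PySem.Dict String (List String)) (p : String × String) =>
      match pvDesignationDict.get? (PySem.Str.lower p.1) with
      | none => r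
      | some _ =>
        if PySem.Str.lower p.2 ∈ ign then r
        else if r.contains (PySem.Str.lower p.1) then
          r.modify (PySem.Str.lower p.1) [] (fun s => PySem.Set.add s (PySem.Str.lower p.2))
        else r.insert (PySem.Str.lower p.1) [PySem.Str.lower p.2])
      = (fun r p =>
        if PySem.Set.contains pvDesignations (PySem.Str.lower p.1) && !(ign.contains (PySem.Str.lower p.2)) then
          r.modify (PySem.Str.lower p.1) [] (fun s => PySem.Set.add s (PySem.Str.lower p.2))
        else r) := by
    funext r p; exact pvBody_eq ign r p.1 p.2
  have h2 : (fun (r : PySem.Dict String (List String)) (p : String × String) =>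
      match pvDesignationDict.get? (PySem.Str.lower p.2) with
      | none => r
      | some _ =>
        if PySem.Str.lower p.1 ∈ ign then r
        else if r.contains (PySem.Str.lower p.2) then
          r.modify (PySem.Str.lower p.2) [] (fun s => PySem.Set.add s (PySem.Str.lower p.1))
        else r.insert (PySem.Str.lower p.2) [PySem.Str.lower p.1])
      = (fun r p =>
        if PySem.Set.contains pvDesignations (PySem.Str.lower p.2) && !(ign.contains (PySem.Str.lower p.1)) then
          r.modify (PySem.Str.lower p.2) [] (fun s => PySem.Set.add s (PySem.Str.lower p.1))
        else r) := by
    funext r p; exact pvBody_eq ign r p.2 p.1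
  rw [h1, h2]
  -- step 2: A = one plain modify fold over the filtered event list
  set events := ((data.map (fun p => (PySem.Str.lower p.1, PySem.Str.lower p.2)))
              ++ (data.map (fun p => (PySem.Str.lower p.2, PySem.Str.lower p.1)))).filter
      (fun q => PySem.Set.contains pvDesignations q.1 && !(ign.contains q.2)) with hev
  have hA : data.foldl (fun r p =>
        if PySem.Set.contains pvDesignations (PySem.Str.lower p.2) && !(ign.contains (PySem.Str.lower p.1)) then
          r.modify (PySem.Str.lower p.2) [] (fun s => PySem.Set.add s (PySem.Str.lower p.1))
        else r)
      (data.foldl (fun r p =>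
        if PySem.Set.contains pvDesignations (PySem.Str.lower p.1) && !(ign.contains (PySem.Str.lower p.2)) then
          r.modify (PySem.Str.lower p.1) [] (fun s => PySem.Set.add s (PySem.Str.lower p.2))
        else r) d0)
      = events.foldl (fun r (q : String × String) => r.modify q.1 [] (fun s => PySem.Set.add s q.2)) d0 := by
    rw [hev, List.foldl_filter, List.foldl_append, List.foldl_map, List.foldl_map]
  rw [hA]
  -- step 3: characterise the modify fold's items as B's group-by construction
  set F := events.foldl (fun r (q : String × String) => r.modify q.1 [] (fun s => PySem.Set.add s q.2)) d0 with hF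
  have hkeys : F.keys = events.foldl (fun ks e => PySem.Set.add ks e.1) d0.keys := by
    rw [hF, PySem.Dict.keys_foldl_modify_key events Prod.fst [] (fun r q => fun s => PySem.Set.add s q.2) d0,
        PySem.Set.update_map_eq_foldl_add]
  have hnodup : F.keys.Nodup := by
    rw [hF]
    exact PySem.Dict.nodup_keys_foldl_modify_key events Prod.fst []
      (fun r q => fun s => PySem.Set.add s q.2) d0 (PySem.Dict.nodup_keys_ofList result)
  rw [PySem.Dict.items_eq_map_keys F hnodup [], hkeys]
  -- step 4: B's output-building insert loop over fresh distinct keys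
  set keys := events.foldl (fun ks e => PySem.Set.add ks e.1) d0.keys with hkeysdef
  have hknd : keys.Nodup := by rw [← hkeys]; exact hnodup
  rw [PySem.Dict.items_foldl_insert_fresh keys (fun k => k)
        (fun k => events.foldl (fun s e => if e.1 == k then PySem.Set.add s e.2 else s) (d0.getD k []))
        PySem.Dict.empty (by intro a _; rfl) (by simpa using hknd)]
  have hempty : (PySem.Dict.empty : PySem.Dict String (List String)).items = [] := rfl
  simp only [hempty, List.nil_append]
  apply List.map_congr_left
  intro k _
  rw [hF, pvGetD_foldl_modify_add]
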